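-- pv_equiv track=rewrite | github.com/srothst1/CNN-Search-For-Art | Painting_Convnet_Data.py | mult_hot_label
-- ===== SOURCE A (Python) =====
-- def mult_hot_label(lst_of_features):
--     label = [0,0,0,0,0,0,0,0,0,0]
--     for feature in lst_of_features:
--         if feature == "aeroplane":
--             label[0] = 1
--         if feature == "bird":
--             label[1] = 1
--         if feature == "boat":
--             label[2] = 1
--         if feature == "chair":
--             label[3] = 1
--         if feature == "cow":
--             label[4] = 1
--         if feature == "diningtable":
--             label[5] = 1
--         if feature == "dog":
--             label[6] = 1
--         if feature == "horse":
--             label[7] = 1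
--         if feature == "sheep":
--             label[8] = 1
--         if feature == "train":
--             label[9] = 1
--     return label
-- ===== SOURCE B (Python) =====
-- CATEGORIES = ["aeroplane", "bird", "boat", "chair", "cow",
--               "diningtable", "dog", "horse", "sheep", "train"]
--
-- def mult_hot_label(lst_of_features):
--     return [1 if cat in lst_of_features else 0 for cat in CATEGORIES]
-- ===== Notes on version B (the rewrite author's own statement) =====
-- stated objective: idiomatic
-- what changed: B inverts the traversal: instead of A's loop over the input with ten if-statements mutating a label list, B maps over the fixed ordered category list and emits 1/0 by a membership test on the input.
import Mathlib
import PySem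

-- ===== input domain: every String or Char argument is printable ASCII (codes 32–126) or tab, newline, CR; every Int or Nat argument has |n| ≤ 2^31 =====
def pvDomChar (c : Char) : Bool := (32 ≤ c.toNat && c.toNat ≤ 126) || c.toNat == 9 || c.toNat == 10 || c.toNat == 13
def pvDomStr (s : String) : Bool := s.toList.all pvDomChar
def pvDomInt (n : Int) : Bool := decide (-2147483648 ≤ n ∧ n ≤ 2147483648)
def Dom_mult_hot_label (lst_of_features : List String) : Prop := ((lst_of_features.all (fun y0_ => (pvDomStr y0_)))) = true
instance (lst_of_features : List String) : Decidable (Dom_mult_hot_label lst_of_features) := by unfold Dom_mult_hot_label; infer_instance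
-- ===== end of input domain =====

-- B replaces A's input loop with ten mutating if-statements by a map over the fixed
-- ordered category list with a membership test (idiomatic; same cost).

-- ===== PORT A =====
-- One iteration of A's for-loop: ten independent ifs, each setting one position of `label`.
def pvStepA (label : List Int) (feature : String) : List Int :=
  let label := if feature = "aeroplane" then label.set 0 1 else label
  let label := if feature = "bird" then label.set 1 1 else label
  let label := if feature = "boat" then label.set 2 1 else label
  let label := if feature = "chair" then label.set 3 1 else label
  let label := if feature = "cow" then label.set 4 1 else label
  let label := if feature = "diningtable" then label.set 5 1 else label
  let label := if feature = "dog" then label.set 6 1 else label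
  let label := if feature = "horse" then label.set 7 1 else label
  let label := if feature = "sheep" then label.set 8 1 else label
  let label := if feature = "train" then label.set 9 1 else label
  label

def mult_hot_label (lst_of_features : List String) : List Int :=
  lst_of_features.foldl pvStepA [0,0,0,0,0,0,0,0,0,0]

-- ===== PORT B =====
def pvCATEGORIES : List String :=
  ["aeroplane", "bird", "boat", "chair", "cow",
   "diningtable", "dog", "horse", "sheep", "train"]

def mult_hot_label_alt (lst_of_features : List String) : List Int :=
  pvCATEGORIES.map (fun cat => if lst_of_features.contains cat then 1 else 0)

-- ===== PRECONDITION & SPEC =====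
def Spec_mult_hot_label (lst_of_features : List String) (out : List Int) : Prop := out = mult_hot_label_alt lst_of_features
instance (lst_of_features : List String) (out : List Int) : Decidable (Spec_mult_hot_label lst_of_features out) := by unfold Spec_mult_hot_label; infer_instance

-- ===== CLAIM (what is proved, stated in full; the proofs are below) =====
def Claim_equal_mult_hot_label : Prop := ∀ (lst_of_features : List String), Dom_mult_hot_label lst_of_features → Spec_mult_hot_label lst_of_features (mult_hot_label lst_of_features)

-- ===== LEMMAS AND PROOFS =====

-- A's fold from an arbitrary 10-element label: position i ends 1 iff category i occurs,
-- otherwise keeps its initial value.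
theorem pvStepA_eq (x : String) (a b c d e f g h i j : Int) :
    pvStepA [a,b,c,d,e,f,g,h,i,j] x =
      [if x = "aeroplane" then 1 else a, if x = "bird" then 1 else b, if x = "boat" then 1 else c, if x = "chair" then 1 else d, if x = "cow" then 1 else e, if x = "diningtable" then 1 else f, if x = "dog" then 1 else g, if x = "horse" then 1 else h, if x = "sheep" then 1 else i, if x = "train" then 1 else j] := by
  by_cases h0 : x = "aeroplane"
  · subst h0; simp [pvStepA]
  by_cases h1 : x = "bird"
  · subst h1; simp [pvStepA]
  by_cases h2 : x = "boat"
  · subst h2; simp [pvStepA]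
  by_cases h3 : x = "chair"
  · subst h3; simp [pvStepA]
  by_cases h4 : x = "cow"
  · subst h4; simp [pvStepA]
  by_cases h5 : x = "diningtable"
  · subst h5; simp [pvStepA]
  by_cases h6 : x = "dog"
  · subst h6; simp [pvStepA]
  by_cases h7 : x = "horse"
  · subst h7; simp [pvStepA]
  by_cases h8 : x = "sheep"
  · subst h8; simp [pvStepA]
  by_cases h9 : x = "train"
  · subst h9; simp [pvStepA]
  simp [pvStepA, h0, h1, h2, h3, h4, h5, h6, h7, h8, h9]


theorem pvMergeIte (P Q : Prop) [Decidable P] [Decidable Q] (a : Int) :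
    (if Q then (1:Int) else if P then 1 else a) = if P ∨ Q then 1 else a := by
  split_ifs <;> tauto

theorem pvFoldA_char (lst : List String) : ∀ (a b c d e f g h i j : Int),
    lst.foldl pvStepA [a,b,c,d,e,f,g,h,i,j] =
      [if lst.contains "aeroplane" then 1 else a,
       if lst.contains "bird" then 1 else b,
       if lst.contains "boat" then 1 else c,
       if lst.contains "chair" then 1 else d,
       if lst.contains "cow" then 1 else e,
       if lst.contains "diningtable" then 1 else f,
       if lst.contains "dog" then 1 else g,
       if lst.contains "horse" then 1 else h,
       if lst.contains "sheep" then 1 else i,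
       if lst.contains "train" then 1 else j] := by
  induction lst with
  | nil => intro a b c d e f g h i j; simp
  | cons x xs ih =>
    intro a b c d e f g h i j
    rw [List.foldl_cons, pvStepA_eq, ih]
    simp only [List.contains_cons, pvMergeIte, Bool.or_eq_true, beq_iff_eq, @eq_comm String x]

-- ===== VERDICT (by name: the statement is the Claim_ definition above) =====
theorem mult_hot_label_spec : Claim_equal_mult_hot_label := by
  intro lst _
  unfold Spec_mult_hot_label mult_hot_label mult_hot_label_alt pvCATEGORIES
  rw [pvFoldA_char]
  simp
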